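-- pv_equiv track=rewrite | github.com/OMPSHUNYAYA/SVARE | demo/svare_v8_1.py | mul_digit
-- ===== SOURCE A (Python) =====
-- def strip_zeros(text):
--     out = text.lstrip("0")
--     return out if out else "0"
--
-- def mul_digit(a, d):
--     if d == 0 or a == "0":
--         return "0"
--     carry = 0
--     out = []
--     for idx in range(len(a) - 1, -1, -1):
--         v = (ord(a[idx]) - 48) * d + carry
--         out.append(chr(48 + (v % 10)))
--         carry = v // 10
--     while carry:
--         out.append(chr(48 + (carry % 10)))
--         carry //= 10
--     return strip_zeros("".join(reversed(out)))
-- ===== SOURCE B (Python) =====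
-- def mul_digit(a, d):
--     # Horner-parse the whole numeral once, multiply as one big integer,
--     # then render the product's digits by repeated divmod.
--     n = 0
--     for ch in a:
--         n = n * 10 + (ord(ch) - 48)
--     n *= d
--     if n == 0:
--         return "0"
--     buf = []
--     while n:
--         buf.append(chr(48 + n % 10))
--         n //= 10
--     return "".join(reversed(buf))
-- ===== Notes on version B (the rewrite author's own statement) =====
-- stated objective: alternative
-- what changed: A multiplies digit-by-digit right-to-left, carrying into the output string and stripping leading zeros; B parses the whole numeral once by a Horner loop, performs a single arbitrary-precision multiply, and renders the product's digits by repeated divmod, so there is no per-character multiply-with-carry and no zero-stripping step.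
import Mathlib
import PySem

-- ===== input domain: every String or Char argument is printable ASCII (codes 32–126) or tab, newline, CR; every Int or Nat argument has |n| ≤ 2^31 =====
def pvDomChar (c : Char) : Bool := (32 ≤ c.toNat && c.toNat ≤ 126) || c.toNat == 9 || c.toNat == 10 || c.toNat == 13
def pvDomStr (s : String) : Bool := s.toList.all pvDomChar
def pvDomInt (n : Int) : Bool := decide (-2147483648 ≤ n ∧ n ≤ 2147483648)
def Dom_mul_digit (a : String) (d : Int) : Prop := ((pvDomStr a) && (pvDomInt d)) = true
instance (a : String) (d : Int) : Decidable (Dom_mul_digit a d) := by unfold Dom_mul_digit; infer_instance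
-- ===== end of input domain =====

-- B replaces A's per-character multiply-with-carry by one Horner parse of the numeral, a single
-- big multiply, and a divmod render loop (objective: alternative; no speed claim).


-- ===== PORT A =====
-- strip_zeros, on the character list of its argument (lstrip("0") = dropWhile (== '0'))
def pvStripZeros (t : List Char) : List Char :=
  let out := t.dropWhile (fun c => c == '0')
  if out = [] then ['0'] else out

-- one iteration of A's 'for idx' loop body, state = (carry, out)
def pvMulStep (d : Int) (st : Int × List Char) (c : Char) : Int × List Char :=
  let v := ((c.toNat : Int) - 48) * d + st.1
  (PySem.Int.floordiv v 10, st.2 ++ [Char.ofNat (48 + PySem.Int.mod v 10).toNat])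

-- A's 'while carry:' loop; Python's test is 'carry ≠ 0' and for carry < 0 the loop never
-- terminates, so this port stops at carry ≤ 0 — exact whenever carry ≥ 0 (guaranteed under Pre_).
def pvCarryLoop (carry : Int) (out : List Char) : List Char :=
  if _h : 0 < carry then
    pvCarryLoop (PySem.Int.floordiv carry 10)
      (out ++ [Char.ofNat (48 + PySem.Int.mod carry 10).toNat])
  else out
termination_by carry.toNat
decreasing_by
  rw [PySem.Int.floordiv_eq_ediv_of_pos (by norm_num)]
  omega

def mul_digit (a : String) (d : Int) : String :=
  if d = 0 ∨ a = "0" then "0"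
  else
    let l := a.toList
    -- a[idx]: idx is always in range here, so pyGetD's default is never used
    let st := (PySem.List.pyRange (PySem.Str.len a - 1) (-1) (-1)).foldl
      (fun st idx => pvMulStep d st (PySem.List.pyGetD l idx '0')) (0, [])
    String.ofList (pvStripZeros ((pvCarryLoop st.1 st.2).reverse))

-- ===== PORT B =====
-- B's 'while n:' render loop (little-endian digits into buf); Python's test is 'n ≠ 0' and for
-- n < 0 the loop never terminates, so this port stops at n ≤ 0 — exact whenever n ≥ 0.
def pvRender (n : Int) (buf : List Char) : List Char :=
  if _h : 0 < n then
    pvRender (PySem.Int.floordiv n 10)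
      (buf ++ [Char.ofNat (48 + PySem.Int.mod n 10).toNat])
  else buf
termination_by n.toNat
decreasing_by
  rw [PySem.Int.floordiv_eq_ediv_of_pos (by norm_num)]
  omega

def mul_digit_alt (a : String) (d : Int) : String :=
  let n := a.toList.foldl (fun n c => n * 10 + ((c.toNat : Int) - 48)) 0
  let m := n * d
  if m = 0 then "0"
  else String.ofList ((pvRender m []).reverse)

-- ===== PRECONDITION & SPEC =====
-- little-endian value of a character list under ord(c) - 48 (the integer the string denotes)
def pvVal : List Char → Int
  | [] => 0
  | c :: t => ((c.toNat : Int) - 48) + 10 * pvVal t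

-- Pre_ excludes exactly the inputs on which A never returns: when the integer denoted by a
-- (digits read as ord(c) - 48) times d is negative, A's trailing 'while carry' loop (and
-- likewise B's 'while n' loop) diverges; A returns a value on no excluded input.
def Pre_mul_digit (a : String) (d : Int) : Prop :=
  0 ≤ pvVal a.toList.reverse * d
instance (a : String) (d : Int) : Decidable (Pre_mul_digit a d) := by
  unfold Pre_mul_digit; infer_instance

def pvWitness_mul_digit : String × Int := ("12", 3)

def Spec_mul_digit (a : String) (d : Int) (out : String) : Prop := out = mul_digit_alt a d
instance (a : String) (d : Int) (out : String) : Decidable (Spec_mul_digit a d out) := by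
  unfold Spec_mul_digit; infer_instance

-- ===== CLAIM (what is proved, stated in full; the proofs are below) =====
def Claim_equal_mul_digit : Prop :=
  ∀ (a : String) (d : Int), Dom_mul_digit a d → Pre_mul_digit a d →
    Spec_mul_digit a d (mul_digit a d)

-- ===== LEMMAS AND PROOFS =====

-- the character for decimal digit dg
def pvDChar (dg : Nat) : Char := Char.ofNat (48 + dg)

lemma pyRange_down (k : Nat) :
    PySem.List.pyRange ((k : Int) - 1) (-1) (-1)
      = (List.range k).map (fun (j : Nat) => (k : Int) - 1 - (j : Int)) := by
  simp only [PySem.List.pyRange]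
  norm_num
  rcases Nat.eq_zero_or_pos k with hk | hk
  · subst hk; norm_num
  · rw [if_pos hk]
    apply List.map_congr_left
    intro x _
    ring

lemma map_idx (l : List Char) :
    (List.range l.length).map
      (fun (j : Nat) => PySem.List.pyGetD l ((l.length : Int) - 1 - (j : Int)) '0') = l.reverse := by
  apply List.ext_getElem
  · simp
  · intro i h1 h2
    simp only [List.getElem_map, List.getElem_range, List.getElem_reverse]
    have hlen : i < l.length := by simpa using h1
    have hcast : ((l.length : Int) - 1 - (i : Int)) = ((l.length - 1 - i : Nat) : Int) := by omega
    rw [hcast, PySem.List.pyGetD_natCast]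
    rw [List.getD_eq_getElem _ _ (by omega)]

lemma pv_digit_split (x r P : Int) (_hP : 0 < P) (hr0 : 0 ≤ r) (hr : r < 10) :
    (10 * x + r) / (10 * P) = x / P ∧ (10 * x + r) % (10 * P) = r + 10 * (x % P) := by
  have h1 : (10 * x + r) / 10 = x := by omega
  have h2 : (10 * x + r) / (10 * P) = x / P := by
    rw [← Int.ediv_ediv_of_nonneg (by norm_num : (0:Int) ≤ 10), h1]
  refine ⟨h2, ?_⟩
  rw [Int.emod_def, Int.emod_def, h2]
  ring

lemma foldA_spec (d : Int) (r : List Char) :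
    ∀ (carry : Int) (out : List Char),
    ∃ ds : List Nat,
      r.foldl (pvMulStep d) (carry, out) =
        ((pvVal r * d + carry) / 10 ^ r.length, out ++ ds.map pvDChar) ∧
      (∀ x ∈ ds, x < 10) ∧ ds.length = r.length ∧
      (((Nat.ofDigits 10 ds : Nat)) : Int) = (pvVal r * d + carry) % 10 ^ r.length := by
  induction r with
  | nil =>
    intro carry out
    refine ⟨[], ?_, by simp, by simp, ?_⟩
    · simp [pvVal]
    · simp [Nat.ofDigits, pvVal]
  | cons c t ih =>
    intro carry out
    set v : Int := ((c.toNat : Int) - 48) * d + carry with hv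
    have hfd : PySem.Int.floordiv v 10 = v / 10 := PySem.Int.floordiv_eq_ediv_of_pos (by norm_num)
    have hmd : PySem.Int.mod v 10 = v % 10 := PySem.Int.mod_eq_emod_of_pos (by norm_num)
    obtain ⟨ds', hfold, hlt, hlen, hval⟩ :=
      ih (v / 10) (out ++ [Char.ofNat (48 + PySem.Int.mod v 10).toNat])
    have hsplit := pv_digit_split (pvVal t * d + v / 10) (v % 10) (10 ^ t.length)
      (by positivity) (by omega) (by omega)
    have hV' : pvVal (c :: t) * d + carry = 10 * (pvVal t * d + v / 10) + v % 10 := by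
      have h2 : pvVal (c :: t) * d + carry = 10 * (pvVal t * d) + v := by
        simp only [pvVal]; ring
      have h3 := Int.mul_ediv_add_emod v 10
      omega
    have hpow : (10 : Int) ^ (c :: t).length = 10 * 10 ^ t.length := by
      rw [List.length_cons, pow_succ]; ring
    refine ⟨(v % 10).toNat :: ds', ?_, ?_, ?_, ?_⟩
    · simp only [List.foldl_cons, pvMulStep, ← hv, hfd]
      rw [hfold]
      refine Prod.ext ?_ ?_
      · show (pvVal t * d + v / 10) / 10 ^ t.length
            = (pvVal (c :: t) * d + carry) / 10 ^ (c :: t).length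
        rw [hV', hpow, hsplit.1]
      · show out ++ [Char.ofNat (48 + PySem.Int.mod v 10).toNat] ++ List.map pvDChar ds'
            = out ++ List.map pvDChar ((v % 10).toNat :: ds')
        simp only [List.map_cons, pvDChar, hmd]
        have hnt : (48 + v % 10).toNat = 48 + (v % 10).toNat := by omega
        rw [hnt]
        simp
    · intro x hx
      rcases List.mem_cons.mp hx with h | h
      · subst h; omega
      · exact hlt x h
    · simp only [List.length_cons]
      omega
    · rw [Nat.ofDigits_cons]
      push_cast
      have h1 : ((v % 10).toNat : Int) = v % 10 := by omega
      push_cast at hval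
      rw [h1, hval, hV', hpow, hsplit.2]

lemma carryLoop_spec (carry : Int) (h : 0 ≤ carry) (out : List Char) :
    pvCarryLoop carry out = out ++ (Nat.digits 10 carry.toNat).map pvDChar := by
  by_cases hpos : 0 < carry
  · rw [pvCarryLoop, dif_pos hpos]
    have hfd : PySem.Int.floordiv carry 10 = carry / 10 :=
      PySem.Int.floordiv_eq_ediv_of_pos (by norm_num)
    have hmd : PySem.Int.mod carry 10 = carry % 10 := PySem.Int.mod_eq_emod_of_pos (by norm_num)
    have hrec := carryLoop_spec (PySem.Int.floordiv carry 10)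
      (by rw [hfd]; exact Int.ediv_nonneg h (by norm_num))
      (out ++ [Char.ofNat (48 + PySem.Int.mod carry 10).toNat])
    rw [hrec]
    have hdig : Nat.digits 10 carry.toNat =
        carry.toNat % 10 :: Nat.digits 10 (carry.toNat / 10) :=
      Nat.digits_def' (by norm_num) (by omega)
    have h1 : (PySem.Int.floordiv carry 10).toNat = carry.toNat / 10 := by
      rw [hfd]; omega
    have h2 : (48 + PySem.Int.mod carry 10).toNat = 48 + carry.toNat % 10 := by
      rw [hmd]; omega
    rw [h1, h2, hdig]
    simp [pvDChar]
  · have hz : carry = 0 := by omega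
    subst hz
    rw [pvCarryLoop]
    simp
termination_by carry.toNat
decreasing_by
  rw [PySem.Int.floordiv_eq_ediv_of_pos (by norm_num)]
  omega

lemma render_spec (n : Int) (h : 0 ≤ n) (buf : List Char) :
    pvRender n buf = buf ++ (Nat.digits 10 n.toNat).map pvDChar := by
  by_cases hpos : 0 < n
  · rw [pvRender, dif_pos hpos]
    have hfd : PySem.Int.floordiv n 10 = n / 10 :=
      PySem.Int.floordiv_eq_ediv_of_pos (by norm_num)
    have hmd : PySem.Int.mod n 10 = n % 10 := PySem.Int.mod_eq_emod_of_pos (by norm_num)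
    have hrec := render_spec (PySem.Int.floordiv n 10)
      (by rw [hfd]; exact Int.ediv_nonneg h (by norm_num))
      (buf ++ [Char.ofNat (48 + PySem.Int.mod n 10).toNat])
    rw [hrec]
    have hdig : Nat.digits 10 n.toNat =
        n.toNat % 10 :: Nat.digits 10 (n.toNat / 10) :=
      Nat.digits_def' (by norm_num) (by omega)
    have h1 : (PySem.Int.floordiv n 10).toNat = n.toNat / 10 := by
      rw [hfd]; omega
    have h2 : (48 + PySem.Int.mod n 10).toNat = 48 + n.toNat % 10 := by
      rw [hmd]; omega
    rw [h1, h2, hdig]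
    simp [pvDChar]
  · have hz : n = 0 := by omega
    subst hz
    rw [pvRender]
    simp
termination_by n.toNat
decreasing_by
  rw [PySem.Int.floordiv_eq_ediv_of_pos (by norm_num)]
  omega

lemma pv_dropWhile_congr {α : Type} (p q : α → Bool) :
    ∀ l : List α, (∀ x ∈ l, p x = q x) → l.dropWhile p = l.dropWhile q := by
  intro l
  induction l with
  | nil => intro _; rfl
  | cons x t ih =>
    intro h
    have hx := h x (by simp)
    simp only [List.dropWhile_cons, hx]
    by_cases hq : q x = true
    · simp [hq, ih (fun y hy => h y (by simp [hy]))]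
    · simp only [Bool.not_eq_true] at hq
      simp [hq]

lemma pv_ofDigits_zeros : ∀ l : List Nat, (∀ x ∈ l, x = 0) → Nat.ofDigits 10 l = 0 := by
  intro l
  induction l with
  | nil => intro _; simp
  | cons x t ih =>
    intro h
    have hx := h x (by simp)
    rw [Nat.ofDigits_cons, hx, ih (fun y hy => h y (by simp [hy]))]

lemma strip_spec (ds : List Nat) (h : ∀ x ∈ ds, x < 10) :
    pvStripZeros ((ds.map pvDChar).reverse) =
      if Nat.ofDigits 10 ds = 0 then ['0']
      else ((Nat.digits 10 (Nat.ofDigits 10 ds)).map pvDChar).reverse := by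
  have hrev : (ds.map pvDChar).reverse = ds.reverse.map pvDChar := by
    rw [List.map_reverse]
  have hdw : (ds.reverse.map pvDChar).dropWhile (fun c => c == '0')
      = (ds.reverse.dropWhile (fun x => x == 0)).map pvDChar := by
    rw [List.dropWhile_map]
    congr 1
    apply pv_dropWhile_congr
    intro x hx
    have hx10 : x < 10 := h x (List.mem_reverse.mp hx)
    simp only [Function.comp]
    interval_cases x <;> decide
  set ds0 := List.rdropWhile (fun x => x == 0) ds with hds0
  have hrd : ds.reverse.dropWhile (fun x => x == 0) = ds0.reverse := by
    rw [hds0, List.rdropWhile, List.reverse_reverse]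
  have hsplitl : ds0 ++ List.rtakeWhile (fun x => x == 0) ds = ds :=
    List.rdropWhile_append_rtakeWhile
  have hofeq : Nat.ofDigits 10 ds = Nat.ofDigits 10 ds0 := by
    conv_lhs => rw [← hsplitl]
    rw [Nat.ofDigits_append]
    have hz : Nat.ofDigits 10 (List.rtakeWhile (fun x => x == 0) ds) = 0 := by
      apply pv_ofDigits_zeros
      intro x hx
      have := List.mem_rtakeWhile_imp hx
      simpa using this
    rw [hz]
    ring
  rcases eq_or_ne ds0 [] with h0 | h0
  · have hzero : Nat.ofDigits 10 ds = 0 := by rw [hofeq, h0]; simp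
    rw [if_pos hzero]
    simp only [pvStripZeros, hrev, hdw, hrd, h0]
    simp
  · have hmem : ∀ x ∈ ds0, x < 10 := by
      intro x hx
      exact h x ((List.rdropWhile_prefix _ _).sublist.subset hx)
    have hlast : ∀ (hne : ds0 ≠ []), ds0.getLast hne ≠ 0 := by
      intro hne
      have := List.rdropWhile_last_not (fun x => x == 0) ds (by rw [← hds0] at *; exact hne)
      simpa using this
    have hdig : Nat.digits 10 (Nat.ofDigits 10 ds0) = ds0 :=
      Nat.digits_ofDigits 10 (by norm_num) ds0 hmem hlast
    have hnz : Nat.ofDigits 10 ds ≠ 0 := by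
      rw [hofeq]
      intro hcon
      have hx : Nat.digits 10 (Nat.ofDigits 10 ds0) = [] := by rw [hcon]; simp
      rw [hdig] at hx
      exact h0 hx
    rw [if_neg hnz, hofeq, hdig]
    simp only [pvStripZeros, hrev, hdw, hrd]
    have hne2 : ds0.reverse.map pvDChar ≠ [] := by
      simp [h0]
    rw [if_neg hne2]
    rw [List.map_reverse]

lemma horner_eq (l : List Char) :
    ∀ init : Int,
      l.foldl (fun n c => n * 10 + ((c.toNat : Int) - 48)) init =
        init * 10 ^ l.length + pvVal l.reverse := by
  induction l with
  | nil => intro init; simp [pvVal]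
  | cons c t ih =>
    intro init
    have happ : ∀ s : List Char, ∀ x : Char,
        pvVal (s ++ [x]) = pvVal s + ((x.toNat : Int) - 48) * 10 ^ s.length := by
      intro s x
      induction s with
      | nil => simp [pvVal]
      | cons y u ihs => simp only [List.cons_append, pvVal, ihs, List.length_cons]; ring
    simp only [List.foldl_cons, ih, List.reverse_cons, happ, List.length_reverse, List.length_cons]
    ring

-- ===== VERDICT (by name: the statement is the Claim_ definition above) =====
theorem mul_digit_spec : Claim_equal_mul_digit := by
  intro a d _ hpre
  unfold Spec_mul_digit
  unfold Pre_mul_digit at hpre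
  set l : List Char := a.toList with hl
  have hB : mul_digit_alt a d =
      if pvVal l.reverse * d = 0 then "0"
      else String.ofList ((pvRender (pvVal l.reverse * d) []).reverse) := by
    simp only [mul_digit_alt]
    rw [← hl, horner_eq]
    simp only [zero_mul, zero_add]
  by_cases hguard : d = 0 ∨ a = "0"
  · unfold mul_digit
    rw [if_pos hguard, hB]
    have hz : pvVal l.reverse * d = 0 := by
      rcases hguard with h | h
      · rw [h]; ring
      · have hx : l = ['0'] := by simp [hl, h]
        rw [hx]
        simp [pvVal]
    rw [if_pos hz]
  · unfold mul_digit
    rw [if_neg hguard, ← hl]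
    have hfold : (PySem.List.pyRange (PySem.Str.len a - 1) (-1) (-1)).foldl
        (fun st idx => pvMulStep d st (PySem.List.pyGetD l idx '0')) ((0 : Int), ([] : List Char))
        = l.reverse.foldl (pvMulStep d) (0, []) := by
      rw [PySem.Str.len_eq, ← hl, pyRange_down, List.foldl_map]
      rw [← List.foldl_map (f := fun (j : Nat) =>
        PySem.List.pyGetD l ((l.length : Int) - 1 - (j : Int)) '0') (g := pvMulStep d)]
      rw [map_idx]
    simp only [hfold]
    obtain ⟨ds, hfoldspec, hlt, hlen, hval⟩ := foldA_spec d l.reverse 0 []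
    set V : Int := pvVal l.reverse * d with hV
    simp only [add_zero] at hfoldspec hval
    have hV0 : 0 ≤ V := hpre
    have hC0 : 0 ≤ V / 10 ^ l.reverse.length := Int.ediv_nonneg (by omega) (by positivity)
    have hst1 : (l.reverse.foldl (pvMulStep d) (0, ([] : List Char))).1
        = V / 10 ^ l.reverse.length := by rw [hfoldspec]
    have hst2 : (l.reverse.foldl (pvMulStep d) (0, ([] : List Char))).2
        = List.map pvDChar ds := by rw [hfoldspec]; rfl
    rw [hst1, hst2, carryLoop_spec _ hC0, ← List.map_append]
    set DS : List Nat := ds ++ Nat.digits 10 (V / 10 ^ l.reverse.length).toNat with hDS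
    have hDSlt : ∀ x ∈ DS, x < 10 := by
      intro x hx
      rcases List.mem_append.mp hx with h | h
      · exact hlt x h
      · exact Nat.digits_lt_base (by norm_num) h
    rw [strip_spec DS hDSlt]
    have hDSval : ((Nat.ofDigits 10 DS : Nat) : Int) = V := by
      rw [hDS, Nat.ofDigits_append, Nat.ofDigits_digits]
      push_cast
      push_cast at hval
      rw [hlen, hval]
      have h1 : ((V / 10 ^ l.reverse.length).toNat : Int) = V / 10 ^ l.reverse.length := by
        omega
      rw [h1]
      linarith [Int.emod_add_mul_ediv V (10 ^ l.reverse.length)]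
    rw [hB]
    by_cases hVz : V = 0
    · have hof : Nat.ofDigits 10 DS = 0 := by omega
      rw [if_pos hof, if_pos hVz]
    · have hne : Nat.ofDigits 10 DS ≠ 0 := by omega
      rw [if_neg hne, if_neg hVz]
      rw [render_spec _ (by omega)]
      have hnat : Nat.ofDigits 10 DS = V.toNat := by omega
      rw [hnat, List.nil_append]
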